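-- pv_equiv track=rewrite | github.com/Owen-Huggins/CS-Projects | CS 1301/HW09.py | friendsgiving
-- ===== SOURCE A (Python) =====
-- def friendsgiving(stores, budget, maxDistance):
--
--
--     if len(stores) == 0:
--         return {}
--
--     else:
--         adict = friendsgiving(stores[1:],budget, maxDistance)
--         (store, price, distance) = stores[0]
--
--         if price < budget and distance < maxDistance:
--             adict[store] = price
--
--         return adict
-- ===== SOURCE B (Python) =====
-- def friendsgiving(stores, budget, maxDistance):
--     adict = {}
--     for store_tuple in reversed(stores):
--         (store, price, distance) = store_tuple
--         if price < budget and distance < maxDistance: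
--             adict[store] = price
--     return adict
-- ===== Notes on version B (the rewrite author's own statement) =====
-- stated objective: simpler
-- what changed: Replaces the O(n)-deep recursion (which slices the list each level) with a single iterative loop over the reversed list accumulating the dict.
import Mathlib
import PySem

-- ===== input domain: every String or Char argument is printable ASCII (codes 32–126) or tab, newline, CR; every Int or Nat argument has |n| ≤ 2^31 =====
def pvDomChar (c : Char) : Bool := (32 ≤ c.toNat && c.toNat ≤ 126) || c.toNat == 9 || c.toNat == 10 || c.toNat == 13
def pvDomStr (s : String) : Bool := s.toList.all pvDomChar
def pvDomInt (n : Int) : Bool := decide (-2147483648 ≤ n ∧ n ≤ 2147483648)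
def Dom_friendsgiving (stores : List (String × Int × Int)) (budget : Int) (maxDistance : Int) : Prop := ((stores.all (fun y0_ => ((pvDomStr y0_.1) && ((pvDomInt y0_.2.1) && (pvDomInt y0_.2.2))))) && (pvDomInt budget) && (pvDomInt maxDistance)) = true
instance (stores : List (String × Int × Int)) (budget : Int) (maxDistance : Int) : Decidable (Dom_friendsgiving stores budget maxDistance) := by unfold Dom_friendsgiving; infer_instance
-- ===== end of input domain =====

-- B replaces A's tail-recursive dict construction with a single iterative fold over the reversed list (objective: simpler).


-- ===== PORT A =====
-- Recursive dict builder, transliterating A: empty for [], else recurse on the tail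
-- then conditionally adict[store] = price for the head.
def friendsgivingDictA (stores : List (String × Int × Int)) (budget : Int) (maxDistance : Int) : PySem.Dict String Int :=
  match stores with
  | [] => PySem.Dict.empty
  | s0 :: rest =>
    let adict := friendsgivingDictA rest budget maxDistance
    let store := s0.1
    let price := s0.2.1
    let distance := s0.2.2
    if price < budget && distance < maxDistance then adict.insert store price else adict

def friendsgiving (stores : List (String × Int × Int)) (budget : Int) (maxDistance : Int) : List (String × Int) :=
  (friendsgivingDictA stores budget maxDistance).items

-- ===== PORT B =====
-- B: iterative loop over reversed(stores) accumulating the dict.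
def friendsgiving_alt (stores : List (String × Int × Int)) (budget : Int) (maxDistance : Int) : List (String × Int) :=
  (stores.reverse.foldl
    (fun adict s0 =>
      if s0.2.1 < budget && s0.2.2 < maxDistance then adict.insert s0.1 s0.2.1 else adict)
    PySem.Dict.empty).items

-- ===== PRECONDITION & SPEC =====
def Spec_friendsgiving (stores : List (String × Int × Int)) (budget : Int) (maxDistance : Int) (out : List (String × Int)) : Prop := out = friendsgiving_alt stores budget maxDistance
instance (stores : List (String × Int × Int)) (budget : Int) (maxDistance : Int) (out : List (String × Int)) : Decidable (Spec_friendsgiving stores budget maxDistance out) := by unfold Spec_friendsgiving; infer_instance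

-- ===== CLAIM (what is proved, stated in full; the proofs are below) =====
def Claim_equal_friendsgiving : Prop := ∀ (stores : List (String × Int × Int)) (budget : Int) (maxDistance : Int), Dom_friendsgiving stores budget maxDistance → Spec_friendsgiving stores budget maxDistance (friendsgiving stores budget maxDistance)

-- ===== LEMMAS AND PROOFS =====

-- ===== VERDICT (by name: the statement is the Claim_ definition above) =====
lemma friendsgivingDictA_eq_foldl (stores : List (String × Int × Int)) (budget maxDistance : Int) :
    friendsgivingDictA stores budget maxDistance =
    stores.reverse.foldl
      (fun adict s0 =>
        if s0.2.1 < budget && s0.2.2 < maxDistance then adict.insert s0.1 s0.2.1 else adict)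
      PySem.Dict.empty := by
  induction stores with
  | nil => rfl
  | cons s0 rest ih =>
    simp [friendsgivingDictA, List.foldl_append, ih]

theorem friendsgiving_spec : Claim_equal_friendsgiving := by
  intro stores budget maxDistance _
  unfold Spec_friendsgiving friendsgiving friendsgiving_alt
  rw [friendsgivingDictA_eq_foldl]
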